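-- pv_equiv track=rewrite | github.com/bjorn-martinsson/NP-hardness-of-Max-2Lin-2 | analyse_gadget.py | parse_gadget
-- ===== SOURCE A (Python) =====
-- def parse_gadget(edge_weights, K):
--     if K == 2:
--         # 2 benicifial edge orbits
--         benificial_edge_orbits = [2, 3]
--         gadget_vars = [0] * 9
--     elif K == 3:
--         # 4 benificial edge orbits
--         benificial_edge_orbits = [2, 13, 3, 5]
--         gadget_vars = [0] * 33
--     elif K == 4:
--         # 33 benificial edge orbits
--         benificial_edge_orbits = [2, 35, 122, 323, 325, 772, 3, 125, 128, 328, 332, 708, 784, 4, 131, 138, 432, 5, 6, 7, 10]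
--         gadget_vars = [0] * 1078
--     else:
--         assert False
--
--     assert len(edge_weights) == len(benificial_edge_orbits)
--     for w,eind in zip(edge_weights, benificial_edge_orbits):
--         gadget_vars[eind] = w
--     return gadget_vars
-- ===== SOURCE B (Python) =====
-- def parse_gadget(edge_weights, K):
--     if K == 2:
--         benificial_edge_orbits = [2, 3]
--         size = 9
--     elif K == 3:
--         benificial_edge_orbits = [2, 13, 3, 5]
--         size = 33
--     elif K == 4:
--         benificial_edge_orbits = [2, 35, 122, 323, 325, 772, 3, 125, 128, 328, 332, 708, 784, 4, 131, 138, 432, 5, 6, 7, 10]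
--         size = 1078
--     else:
--         assert False
--     assert len(edge_weights) == len(benificial_edge_orbits)
--     # sort the (position, weight) pairs and emit the output left to right,
--     # filling the gaps between consecutive occupied positions with zero runs
--     out = []
--     prev = 0
--     for e, w in sorted(zip(benificial_edge_orbits, edge_weights), key=lambda p: p[0]):
--         out.extend([0] * (e - prev))
--         out.append(w)
--         prev = e + 1
--     out.extend([0] * (size - prev))
--     return out
-- ===== Notes on version B (the rewrite author's own statement) =====
-- stated objective: alternative
-- what changed: B replaces A's scatter into a preallocated zero array (random-access index assignment per edge) by sorting the (orbit, weight) pairs by position and emitting the output strictly left-to-right in one sequential pass, concatenating zero runs between consecutive occupied positions; correct because the orbit positions are distinct and in range.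
import Mathlib
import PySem

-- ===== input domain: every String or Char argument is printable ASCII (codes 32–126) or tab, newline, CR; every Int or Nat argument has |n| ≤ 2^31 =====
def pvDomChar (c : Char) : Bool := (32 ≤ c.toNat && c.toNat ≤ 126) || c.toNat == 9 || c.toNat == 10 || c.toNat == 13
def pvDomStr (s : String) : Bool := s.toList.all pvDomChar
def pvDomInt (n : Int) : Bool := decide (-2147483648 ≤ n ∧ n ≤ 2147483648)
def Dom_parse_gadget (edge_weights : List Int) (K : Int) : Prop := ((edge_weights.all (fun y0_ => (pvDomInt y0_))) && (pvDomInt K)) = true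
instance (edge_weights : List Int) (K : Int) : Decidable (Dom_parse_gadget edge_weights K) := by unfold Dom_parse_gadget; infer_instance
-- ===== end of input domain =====

-- B sorts the (orbit, weight) pairs by position and emits the output left-to-right in one
-- sequential pass with zero runs between occupied positions, instead of A's random-access
-- scatter into a preallocated zero array; equivalence on inputs where A's asserts pass.
-- ===== PORT A =====
def pvScatter (gv : List Int) (pairs : List (Int × Int)) : List Int :=
  pairs.foldl (fun gv p => gv.set p.2.toNat p.1) gv

def parse_gadget (edge_weights : List Int) (K : Int) : List Int :=
  let benificial_edge_orbits : List Int :=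
    if K = 2 then [2, 3]
    else if K = 3 then [2, 13, 3, 5]
    else [2, 35, 122, 323, 325, 772, 3, 125, 128, 328, 332, 708, 784, 4, 131, 138, 432, 5, 6, 7, 10]
  let gadget_vars : List Int :=
    if K = 2 then List.replicate 9 0
    else if K = 3 then List.replicate 33 0
    else List.replicate 1078 0
  pvScatter gadget_vars (edge_weights.zip benificial_edge_orbits)

-- ===== PORT B =====
-- the 'for e, w in sorted(...)' loop of Source B: state = (out, prev)
def pvGapLoop (pairs : List (Int × Int)) (out : List Int) (prev : Int) : List Int × Int :=
  match pairs with
  | [] => (out, prev)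
  | (e, w) :: t => pvGapLoop t (out ++ List.replicate (e - prev).toNat 0 ++ [w]) (e + 1)

def parse_gadget_alt (edge_weights : List Int) (K : Int) : List Int :=
  let benificial_edge_orbits : List Int :=
    if K = 2 then [2, 3]
    else if K = 3 then [2, 13, 3, 5]
    else [2, 35, 122, 323, 325, 772, 3, 125, 128, 328, 332, 708, 784, 4, 131, 138, 432, 5, 6, 7, 10]
  let size : Int :=
    if K = 2 then 9 else if K = 3 then 33 else 1078
  let s := pvGapLoop
    (PySem.List.sorted (benificial_edge_orbits.zip edge_weights) (fun p => p.1) false) [] 0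
  s.1 ++ List.replicate (size - s.2).toNat 0

-- ===== PRECONDITION & SPEC =====
-- Pre_ excludes exactly the inputs on which A raises AssertionError: K outside 2..4, or a
-- weight list whose length differs from the orbit list chosen by K.
def Pre_parse_gadget (edge_weights : List Int) (K : Int) : Prop :=
  (K = 2 ∧ edge_weights.length = 2) ∨ (K = 3 ∧ edge_weights.length = 4) ∨ (K = 4 ∧ edge_weights.length = 21)
instance (edge_weights : List Int) (K : Int) : Decidable (Pre_parse_gadget edge_weights K) := by unfold Pre_parse_gadget; infer_instance
def pvWitness_parse_gadget : List Int × Int := ([5, -7], 2)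
def Spec_parse_gadget (edge_weights : List Int) (K : Int) (out : List Int) : Prop := out = parse_gadget_alt edge_weights K
instance (edge_weights : List Int) (K : Int) (out : List Int) : Decidable (Spec_parse_gadget edge_weights K out) := by unfold Spec_parse_gadget; infer_instance

-- ===== CLAIM (what is proved, stated in full; the proofs are below) =====
def Claim_equal_parse_gadget : Prop := ∀ (edge_weights : List Int) (K : Int), Dom_parse_gadget edge_weights K → Pre_parse_gadget edge_weights K → Spec_parse_gadget edge_weights K (parse_gadget edge_weights K)

-- ===== LEMMAS AND PROOFS =====
-- last-occurrence lookup: the value stored at `key` by the pairs of `l` taken left to right, default `d`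
def pvLastD (l : List (Int × Int)) (key : Int) (d : Int) : Int :=
  match l with
  | [] => d
  | (k, v) :: t => pvLastD t key (if key = k then v else d)

theorem pvLastD_of_not_mem (l : List (Int × Int)) (key d : Int)
    (h : ∀ p ∈ l, key ≠ p.1) : pvLastD l key d = d := by
  induction l generalizing d with
  | nil => rfl
  | cons p t ih =>
    obtain ⟨k, v⟩ := p
    have hk : key ≠ k := h (k, v) List.mem_cons_self
    simp only [pvLastD, if_neg hk]
    exact ih d (fun q hq => h q (List.mem_cons_of_mem _ hq))

-- pvLastD only depends on the key→value association: permutation-invariant for distinct keys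
theorem pvLastD_perm (l₁ l₂ : List (Int × Int)) (h : l₁.Perm l₂)
    (hn : (l₁.map Prod.fst).Nodup) : ∀ key d, pvLastD l₁ key d = pvLastD l₂ key d := by
  induction h with
  | nil => intro key d; rfl
  | cons p h ih =>
    intro key d
    obtain ⟨k, v⟩ := p
    simp only [pvLastD]
    exact ih (by simpa using hn.of_cons) key _
  | swap p q t =>
    intro key d
    obtain ⟨k₁, v₁⟩ := p
    obtain ⟨k₂, v₂⟩ := q
    have hne : k₁ ≠ k₂ := by
      intro h
      subst h
      simp [List.nodup_cons] at hn
    simp only [pvLastD]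
    congr 1
    by_cases h1 : key = k₁ <;> by_cases h2 : key = k₂
    · exact absurd (h1.symm.trans h2) hne
    · simp [h1]
      exact fun h => absurd h hne
    · simp [h2]
      exact fun h => absurd h.symm hne
    · simp [h1, h2]
  | trans h1 h2 ih1 ih2 =>
    intro key d
    have hn2 := ((h1.map Prod.fst).nodup_iff).mp hn
    exact (ih1 hn key d).trans (ih2 hn2 key d)

theorem length_pvScatter (ps : List (Int × Int)) (gv : List Int) :
    (pvScatter gv ps).length = gv.length := by
  induction ps generalizing gv with
  | nil => rfl
  | cons p t ih => simp only [pvScatter, List.foldl_cons] at ih ⊢; rw [ih, List.length_set]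

theorem pvScatter_getElem (ps : List (Int × Int)) (gv : List Int) (n : Nat)
    (hn : n < (pvScatter gv ps).length)
    (hps : ∀ p ∈ ps, 0 ≤ p.2 ∧ p.2 < (gv.length : Int)) :
    (pvScatter gv ps)[n] = pvLastD (ps.map (fun p => (p.2, p.1))) (n : Int) (gv.getD n 0) := by
  induction ps generalizing gv with
  | nil =>
    simp only [pvScatter, List.foldl_nil] at hn ⊢
    simp only [List.map_nil, pvLastD]
    exact (List.getD_eq_getElem _ _ hn).symm
  | cons p t ih =>
    obtain ⟨w, e⟩ := p
    have he := hps (w, e) (List.mem_cons_self)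
    simp only at he
    have hn' : n < (pvScatter (gv.set e.toNat w) t).length := by
      simpa only [pvScatter, List.foldl_cons] using hn
    have hlen : n < gv.length := by
      have := length_pvScatter t (gv.set e.toNat w)
      rw [this, List.length_set] at hn'; exact hn'
    have step : (pvScatter gv ((w, e) :: t))[n]'hn = (pvScatter (gv.set e.toNat w) t)[n]'hn' := by
      simp only [pvScatter, List.foldl_cons]
    rw [step, ih (gv.set e.toNat w) hn'
      (by intro q hq; have := hps q (List.mem_cons_of_mem _ hq); simpa [List.length_set] using this)]
    simp only [List.map_cons, pvLastD]
    congr 1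
    rw [List.getD_eq_getElem _ _ (by rwa [List.length_set]), List.getElem_set,
      List.getD_eq_getElem _ _ hlen]
    by_cases h : (n : Int) = e
    · have : e.toNat = n := by omega
      simp [this, h]
    · have : e.toNat ≠ n := by omega
      simp [this, h]

-- A's scatter into a zero array, read pointwise, is the last-wins lookup over every position
theorem scatter_eq_mapLast (L ws : List Int) (size : Nat)
    (hL : ∀ e ∈ L, 0 ≤ e ∧ e < (size : Int)) :
    pvScatter (List.replicate size 0) (ws.zip L)
      = (PySem.List.pyRange 0 (size : Int) 1).map (fun i => pvLastD (L.zip ws) i 0) := by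
  apply List.ext_getElem
  · rw [length_pvScatter, List.length_replicate, List.length_map,
      PySem.List.length_pyRange_one]
    omega
  · intro n h1 h2
    rw [List.getElem_map, PySem.List.getElem_pyRange_one]
    have hn0 : (0 : Int) + (n : Int) = (n : Int) := by ring
    rw [hn0]
    have hzip : (ws.zip L).map (fun p => (p.2, p.1)) = L.zip ws := by
      rw [show (fun p : Int × Int => (p.2, p.1)) = Prod.swap from rfl, List.zip_swap]
    rw [pvScatter_getElem (ws.zip L) (List.replicate size 0) n h1
      (by intro q hq
          have hqL : q.2 ∈ L := (List.of_mem_zip hq).2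
          simpa [List.length_replicate] using hL q.2 hqL)]
    rw [hzip]
    congr 1
    have hn : n < size := by
      have := length_pvScatter (ws.zip L) (List.replicate size 0)
      rw [this, List.length_replicate] at h1; exact h1
    rw [List.getD_eq_getElem _ _ (by simpa [List.length_replicate] using hn :
      n < (List.replicate size (0 : Int)).length), List.getElem_replicate]

-- the loop accumulator only grows on the right
theorem pvGapLoop_append (pairs : List (Int × Int)) (out : List Int) (prev : Int) :
    pvGapLoop pairs out prev
      = (out ++ (pvGapLoop pairs [] prev).1, (pvGapLoop pairs [] prev).2) := by
  induction pairs generalizing out prev with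
  | nil => simp [pvGapLoop]
  | cons p t ih =>
    obtain ⟨e, w⟩ := p
    simp only [pvGapLoop, List.nil_append]
    rw [ih (out ++ List.replicate (e - prev).toNat 0 ++ [w]) (e + 1),
      ih (List.replicate (e - prev).toNat 0 ++ [w]) (e + 1)]
    simp

-- a run of zeros is the constant map over the corresponding range
theorem replicate_eq_map_pyRange (a b : Int) :
    List.replicate (b - a).toNat (0 : Int)
      = (PySem.List.pyRange a b 1).map (fun _ => (0 : Int)) := by
  rw [PySem.List.pyRange_one, List.map_map]
  simp [Function.comp_def, List.map_const']

-- the heart of B: gap-filling over sorted in-range pairs reads back as the last-wins lookup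
theorem gapLoop_eq_mapLast (pairs : List (Int × Int)) (prev size : Int)
    (hmono : pairs.Pairwise (fun p q => p.1 < q.1))
    (hrange : ∀ p ∈ pairs, prev ≤ p.1 ∧ p.1 < size) (hps : prev ≤ size) :
    (pvGapLoop pairs [] prev).1
        ++ List.replicate (size - (pvGapLoop pairs [] prev).2).toNat 0
      = (PySem.List.pyRange prev size 1).map (fun i => pvLastD pairs i 0) := by
  induction pairs generalizing prev with
  | nil =>
    simp only [pvGapLoop, List.nil_append]
    rw [replicate_eq_map_pyRange prev size]
    exact List.map_congr_left (fun _ _ => rfl)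
  | cons p t ih =>
    obtain ⟨e, w⟩ := p
    have he := hrange (e, w) List.mem_cons_self
    simp only at he
    have ht : ∀ q ∈ t, e < q.1 := fun q hq => (List.pairwise_cons.mp hmono).1 q hq
    simp only [pvGapLoop]
    rw [pvGapLoop_append]
    dsimp only
    simp only [List.nil_append, List.append_assoc]
    have hsplit1 : PySem.List.pyRange prev size 1
        = PySem.List.pyRange prev e 1 ++ PySem.List.pyRange e size 1 := by
      rw [PySem.List.pyRange_one_append] <;> omega
    have hsplit2 : PySem.List.pyRange e size 1
        = e :: PySem.List.pyRange (e + 1) size 1 := by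
      rw [PySem.List.pyRange_one_cons] ; omega
    rw [hsplit1, hsplit2, List.map_append, List.map_cons]
    congr 1
    · -- the zero run before position e
      rw [replicate_eq_map_pyRange prev e]
      refine List.map_congr_left (fun i hi => ?_)
      have hie : i < e := (PySem.List.mem_pyRange_one.mp hi).2
      simp only [pvLastD, if_neg (by omega : ¬ i = e)]
      exact (pvLastD_of_not_mem t i 0 (fun q hq => by have := ht q hq; omega)).symm
    · -- position e itself, then the recursive tail from e+1
      rw [List.singleton_append]
      congr 1
      · simp only [pvLastD, if_pos]
        exact (pvLastD_of_not_mem t e w (fun q hq => by have := ht q hq; omega)).symm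
      · rw [ih (e + 1) (List.pairwise_cons.mp hmono).2
          (fun q hq => by have := ht q hq; have := hrange q (List.mem_cons_of_mem _ hq); omega)
          (by omega)]
        refine List.map_congr_left (fun i hi => ?_)
        have hie : e + 1 ≤ i := (PySem.List.mem_pyRange_one.mp hi).1
        simp only [pvLastD, if_neg (by omega : ¬ i = e)]

-- one K-case of the equivalence, for an arbitrary distinct in-range orbit list
theorem case_eq (L ws : List Int) (size : Nat)
    (hnd : L.Nodup) (hL : ∀ e ∈ L, 0 ≤ e ∧ e < (size : Int))
    (hlen : ws.length = L.length) :
    pvScatter (List.replicate size 0) (ws.zip L)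
      = (let s := pvGapLoop (PySem.List.sorted (L.zip ws) (fun p => p.1) false) [] 0;
         s.1 ++ List.replicate ((size : Int) - s.2).toNat 0) := by
  have hmapfst : (L.zip ws).map Prod.fst = L := List.map_fst_zip (le_of_eq hlen.symm)
  have hzipnd : ((L.zip ws).map Prod.fst).Nodup := by rw [hmapfst]; exact hnd
  set P := PySem.List.sorted (L.zip ws) (fun p => p.1) false with hP
  have hperm : P.Perm (L.zip ws) := PySem.List.sorted_perm _ _ _
  have hPnd : (P.map Prod.fst).Nodup := ((hperm.map Prod.fst).nodup_iff).mpr hzipnd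
  have hPle : P.Pairwise (fun p q => p.1 ≤ q.1) := PySem.List.sorted_pairwise _ _
  have hPne : P.Pairwise (fun p q => p.1 ≠ q.1) := List.pairwise_map.mp hPnd
  have hPlt : P.Pairwise (fun p q => p.1 < q.1) :=
    (hPle.and hPne).imp (fun h => lt_of_le_of_ne h.1 h.2)
  have hPrange : ∀ p ∈ P, (0 : Int) ≤ p.1 ∧ p.1 < (size : Int) := by
    intro p hp
    have : p ∈ L.zip ws := (PySem.List.mem_sorted _ _ _ _).mp hp
    exact hL p.1 (List.of_mem_zip this).1
  rw [scatter_eq_mapLast L ws size hL,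
    gapLoop_eq_mapLast P 0 (size : Int) hPlt (by simpa using hPrange) (by positivity)]
  refine List.map_congr_left (fun i _ => ?_)
  exact pvLastD_perm (L.zip ws) P hperm.symm hzipnd i 0

-- ===== VERDICT (by name: the statement is the Claim_ definition above) =====
theorem parse_gadget_spec : Claim_equal_parse_gadget := by
  intro ws K _ hpre
  unfold Spec_parse_gadget parse_gadget parse_gadget_alt
  rcases hpre with ⟨hK, hl⟩ | ⟨hK, hl⟩ | ⟨hK, hl⟩ <;> subst hK <;> norm_num
  · exact case_eq [2, 3] ws 9 (by decide) (by decide) (by simp [hl])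
  · exact case_eq [2, 13, 3, 5] ws 33 (by decide) (by decide) (by simp [hl])
  · exact case_eq [2, 35, 122, 323, 325, 772, 3, 125, 128, 328, 332, 708, 784, 4, 131, 138, 432, 5, 6, 7, 10] ws 1078 (by decide) (by decide) (by simp [hl])
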